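-- pv_equiv track=rewrite | github.com/larian-balea/AI-UBB | Semester 1/Fundamental Algorithms/LAB/Lab 2/p6.py | age_in_years
-- ===== SOURCE A (Python) =====
-- def age_in_years(bd, bm, by, cd, cm, cy):
--     if cy < by:
--         return 0
--     elif cy == by and cm < bm:
--         return 0
--     elif cy == by and cm == bm and cd < bd:
--         return 0
--
--     age = 0
--     while by < cy:
--         age += 1
--         by += 1
--     if cm < bm or (cm == bm and cd < bd):
--         age -= 1
--
--     return age
-- ===== SOURCE B (Python) =====
-- def age_in_years(bd, bm, by, cd, cm, cy):
--     age = cy - by - (1 if (cm, cd) < (bm, bd) else 0)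
--     return max(age, 0)
-- ===== Notes on version B (the rewrite author's own statement) =====
-- stated objective: simpler
-- what changed: Replaces the year-counting while loop and the three early-return guards by a closed form: cy - by minus a tuple-comparison birthday adjustment, clamped to 0 with max.
import Mathlib
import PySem

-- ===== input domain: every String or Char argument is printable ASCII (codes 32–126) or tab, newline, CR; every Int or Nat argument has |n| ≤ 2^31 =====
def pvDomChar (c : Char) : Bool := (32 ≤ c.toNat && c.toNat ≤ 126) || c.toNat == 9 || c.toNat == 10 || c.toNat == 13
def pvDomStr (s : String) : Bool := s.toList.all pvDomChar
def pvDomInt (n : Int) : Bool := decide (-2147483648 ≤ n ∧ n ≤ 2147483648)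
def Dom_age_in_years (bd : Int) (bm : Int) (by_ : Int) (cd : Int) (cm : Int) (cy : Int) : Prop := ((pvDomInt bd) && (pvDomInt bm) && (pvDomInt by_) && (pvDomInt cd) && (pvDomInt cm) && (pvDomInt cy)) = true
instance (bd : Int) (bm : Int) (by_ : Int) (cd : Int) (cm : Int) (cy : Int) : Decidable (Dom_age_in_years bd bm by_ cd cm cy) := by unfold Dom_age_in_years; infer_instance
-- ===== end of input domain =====

-- B replaces A's year-counting while loop and three early-return guards by the closed form
-- max(cy - by - [birthday not yet reached], 0)  (simpler).

-- ===== PORT A =====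
-- the while loop: while by_ < cy: age += 1; by_ += 1
def ageLoopA (age : Int) (by_ : Int) (cy : Int) : Int :=
  if h : by_ < cy then ageLoopA (age + 1) (by_ + 1) cy else age
  termination_by (cy - by_).toNat
  decreasing_by omega

def age_in_years (bd : Int) (bm : Int) (by_ : Int) (cd : Int) (cm : Int) (cy : Int) : Int :=
  if cy < by_ then 0
  else if cy = by_ ∧ cm < bm then 0
  else if cy = by_ ∧ cm = bm ∧ cd < bd then 0
  else
    let age := ageLoopA 0 by_ cy
    let age := if cm < bm ∨ (cm = bm ∧ cd < bd) then age - 1 else age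
    age

-- ===== PORT B =====
def age_in_years_alt (bd : Int) (bm : Int) (by_ : Int) (cd : Int) (cm : Int) (cy : Int) : Int :=
  -- (cm, cd) < (bm, bd): Python's lexicographic tuple comparison, written out (exact)
  let age := cy - by_ - (if cm < bm ∨ (cm = bm ∧ cd < bd) then 1 else 0)
  max age 0

-- ===== PRECONDITION & SPEC =====
def Spec_age_in_years (bd : Int) (bm : Int) (by_ : Int) (cd : Int) (cm : Int) (cy : Int) (out : Int) : Prop := out = age_in_years_alt bd bm by_ cd cm cy
instance (bd : Int) (bm : Int) (by_ : Int) (cd : Int) (cm : Int) (cy : Int) (out : Int) : Decidable (Spec_age_in_years bd bm by_ cd cm cy out) := by unfold Spec_age_in_years; infer_instance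

-- ===== CLAIM (what is proved, stated in full; the proofs are below) =====
def Claim_equal_age_in_years : Prop := ∀ (bd : Int) (bm : Int) (by_ : Int) (cd : Int) (cm : Int) (cy : Int), Dom_age_in_years bd bm by_ cd cm cy → Spec_age_in_years bd bm by_ cd cm cy (age_in_years bd bm by_ cd cm cy)

-- ===== LEMMAS AND PROOFS =====
theorem ageLoopA_eq (age by_ cy : Int) : ageLoopA age by_ cy = age + max (cy - by_) 0 := by
  by_cases h : by_ < cy
  · rw [ageLoopA]
    simp only [h, dite_true]
    rw [ageLoopA_eq (age + 1) (by_ + 1) cy]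
    omega
  · rw [ageLoopA]
    simp only [h, dite_false]
    omega
  termination_by (cy - by_).toNat
  decreasing_by omega

-- ===== VERDICT (by name: the statement is the Claim_ definition above) =====
theorem age_in_years_spec : Claim_equal_age_in_years := by
  intro bd bm by_ cd cm cy _
  unfold Spec_age_in_years age_in_years age_in_years_alt
  rw [ageLoopA_eq]
  dsimp only
  rw [max_def, max_def]
  split_ifs <;> omega
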